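-- pv_equiv track=rewrite | github.com/yuxuan3713/SlowME | tool_func.py | segment_mut_count_pair_not
-- ===== SOURCE A (Python) =====
-- def mutation_count_pair_not(r, s):
--     assert len(r) == len(s), "sequence not aligned"
--     count = 0
--     length = len(r)
--     for i in range(len(r)):
--         if r[i] == '-' or s[i] == '-':
--             length -= 1
--             continue
--         elif r[i].upper() != s[i].upper():
--             count += 1
--     return count, length
--
-- def segment_mut_count_pair_not(r, s, l):
--     assert len(r) == len(s)
--     assert len(r) > l
--     result = list()
--     for i in range(int(len(r) / l)):
--         first_seq = r[l * i: l * (i + 1) - 1]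
--         second_seq = s[l * i: l * (i + 1) - 1]
--         result.append(mutation_count_pair_not(first_seq, second_seq)[0])
--     return result
-- ===== SOURCE B (Python) =====
-- def segment_mut_count_pair_not(r, s, l):
--     assert len(r) == len(s)
--     assert len(r) > l
--     result = []
--     if l <= 0:
--         return result
--     count = 0
--     for j in range((len(r) // l) * l):
--         if j % l == l - 1:
--             result.append(count)
--             count = 0
--         elif r[j] != '-' and s[j] != '-' and r[j].upper() != s[j].upper():
--             count += 1
--     return result
-- ===== Notes on version B (the rewrite author's own statement) =====
-- stated objective: simpler
-- what changed: Replaces the per-segment slicing plus the helper's pair-returning scan by one flat linear sweep over character positions, closing a segment whenever j % l == l-1 (the dropped last character).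
import Mathlib
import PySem

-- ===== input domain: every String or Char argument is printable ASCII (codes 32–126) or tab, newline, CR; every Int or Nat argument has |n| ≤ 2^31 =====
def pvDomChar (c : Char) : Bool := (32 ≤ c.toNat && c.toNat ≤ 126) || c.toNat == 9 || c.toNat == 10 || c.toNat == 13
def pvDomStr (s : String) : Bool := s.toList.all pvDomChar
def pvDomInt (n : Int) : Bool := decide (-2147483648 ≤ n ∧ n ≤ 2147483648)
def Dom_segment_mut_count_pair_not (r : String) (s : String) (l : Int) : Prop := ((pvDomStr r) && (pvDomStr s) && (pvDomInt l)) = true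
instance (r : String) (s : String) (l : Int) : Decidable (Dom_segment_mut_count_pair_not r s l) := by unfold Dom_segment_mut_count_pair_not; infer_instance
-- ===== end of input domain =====

-- B replaces the nested segment-slicing loop by one flat linear sweep over positions with
-- modular arithmetic (objective: simpler decomposition, no asymptotic speed claim).

-- ===== PORT A =====
-- helper mutation_count_pair_not; indices from range(len(r)) are in bounds, so getD is exact
def pvMutCount (rl sl : List Char) : Int × Int :=
  (List.range rl.length).foldl
    (fun (st : Int × Int) i =>
      if rl.getD i ' ' = '-' ∨ sl.getD i ' ' = '-' then (st.1, st.2 - 1)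
      else if PySem.Chars.upperChar (rl.getD i ' ') ≠ PySem.Chars.upperChar (sl.getD i ' ') then
        (st.1 + 1, st.2)
      else st)
    (0, (rl.length : Int))

-- int(len(r)/l) truncates toward zero = Int.tdiv (exact here: len(r) < 2^53 so the float
-- division rounds to the exact quotient's truncation); l = 0 (ZeroDivisionError) is excluded by Pre_
def segment_mut_count_pair_not (r : String) (s : String) (l : Int) : List Int :=
  (PySem.List.pyRange 0 (Int.tdiv (r.toList.length : Int) l) 1).foldl
    (fun res i =>
      res ++ [(pvMutCount (PySem.List.slice r.toList (some (l * i)) (some (l * (i + 1) - 1)))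
                          (PySem.List.slice s.toList (some (l * i)) (some (l * (i + 1) - 1)))).1])
    []

-- ===== PORT B =====
-- flat sweep: j runs over range((len(r)//l)*l); j % l == l-1 closes a segment
def segment_mut_count_pair_not_alt (r : String) (s : String) (l : Int) : List Int :=
  if l ≤ 0 then []
  else
    ((PySem.List.pyRange 0 (PySem.Int.floordiv (r.toList.length : Int) l * l) 1).foldl
      (fun (st : List Int × Int) j =>
        if PySem.Int.mod j l = l - 1 then (st.1 ++ [st.2], 0)
        else if r.toList.getD j.toNat ' ' ≠ '-' ∧ s.toList.getD j.toNat ' ' ≠ '-' ∧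
                PySem.Chars.upperChar (r.toList.getD j.toNat ' ') ≠
                  PySem.Chars.upperChar (s.toList.getD j.toNat ' ')
        then (st.1, st.2 + 1) else st)
      ([], 0)).1

-- ===== PRECONDITION & SPEC =====
-- Pre_ excludes exactly the inputs where A raises: AssertionError (len(r) != len(s) or len(r) <= l)
-- and ZeroDivisionError (l = 0)
def Pre_segment_mut_count_pair_not (r : String) (s : String) (l : Int) : Prop :=
  r.toList.length = s.toList.length ∧ l ≠ 0 ∧ l < (r.toList.length : Int)
instance (r : String) (s : String) (l : Int) : Decidable (Pre_segment_mut_count_pair_not r s l) := by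
  unfold Pre_segment_mut_count_pair_not; infer_instance
def pvWitness_segment_mut_count_pair_not : String × String × Int := ("AC-G", "acCG", 3)

def Spec_segment_mut_count_pair_not (r : String) (s : String) (l : Int) (out : List Int) : Prop := out = segment_mut_count_pair_not_alt r s l
instance (r : String) (s : String) (l : Int) (out : List Int) : Decidable (Spec_segment_mut_count_pair_not r s l out) := by unfold Spec_segment_mut_count_pair_not; infer_instance

-- ===== CLAIM (what is proved, stated in full; the proofs are below) =====
def Claim_equal_segment_mut_count_pair_not : Prop := ∀ (r : String) (s : String) (l : Int), Dom_segment_mut_count_pair_not r s l → Pre_segment_mut_count_pair_not r s l → Spec_segment_mut_count_pair_not r s l (segment_mut_count_pair_not r s l)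

-- ===== LEMMAS AND PROOFS =====

def pvHit (rl sl : List Char) (j : Nat) : Bool :=
  decide (rl.getD j ' ' ≠ '-' ∧ sl.getD j ' ' ≠ '-' ∧
    PySem.Chars.upperChar (rl.getD j ' ') ≠ PySem.Chars.upperChar (sl.getD j ' '))

theorem pvMutFold_fst (rl sl : List Char) (is : List Nat) (c t : Int) :
    ((is.foldl (fun (st : Int × Int) i =>
      if rl.getD i ' ' = '-' ∨ sl.getD i ' ' = '-' then (st.1, st.2 - 1)
      else if PySem.Chars.upperChar (rl.getD i ' ') ≠ PySem.Chars.upperChar (sl.getD i ' ') then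
        (st.1 + 1, st.2)
      else st) (c, t))).1 = c + (is.countP (pvHit rl sl) : Int) := by
  induction is generalizing c t with
  | nil => simp
  | cons i is ih =>
      simp only [List.foldl_cons, List.countP_cons]
      by_cases h1 : rl.getD i ' ' = '-' ∨ sl.getD i ' ' = '-'
      · have hh : pvHit rl sl i = false := by
          simp only [pvHit, decide_eq_false_iff_not]; tauto
        rw [if_pos h1, ih, hh]; simp
      · by_cases h2 : PySem.Chars.upperChar (rl.getD i ' ') ≠ PySem.Chars.upperChar (sl.getD i ' ')
        · have hh : pvHit rl sl i = true := by
            simp only [pvHit, decide_eq_true_eq]; tauto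
          rw [if_neg h1, if_pos h2, ih, hh]; simp; ring
        · have hh : pvHit rl sl i = false := by
            simp only [pvHit, decide_eq_false_iff_not]; tauto
          rw [if_neg h1, if_neg h2, ih, hh]; simp

theorem pvBFold_no_close (rl sl : List Char) (l : Int) (js : List Int)
    (h : ∀ j ∈ js, PySem.Int.mod j l ≠ l - 1) (acc : List Int) (c : Int) :
    js.foldl (fun (st : List Int × Int) j =>
        if PySem.Int.mod j l = l - 1 then (st.1 ++ [st.2], 0)
        else if rl.getD j.toNat ' ' ≠ '-' ∧ sl.getD j.toNat ' ' ≠ '-' ∧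
                PySem.Chars.upperChar (rl.getD j.toNat ' ') ≠
                  PySem.Chars.upperChar (sl.getD j.toNat ' ')
        then (st.1, st.2 + 1) else st) (acc, c)
      = (acc, c + (js.countP (fun j => pvHit rl sl j.toNat) : Int)) := by
  induction js generalizing c with
  | nil => simp
  | cons j js ih =>
      simp only [List.foldl_cons, List.countP_cons]
      rw [if_neg (h j (by simp))]
      by_cases h2 : rl.getD j.toNat ' ' ≠ '-' ∧ sl.getD j.toNat ' ' ≠ '-' ∧
          PySem.Chars.upperChar (rl.getD j.toNat ' ') ≠
            PySem.Chars.upperChar (sl.getD j.toNat ' ')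
      · have hh : pvHit rl sl j.toNat = true := by
          simp only [pvHit, decide_eq_true_eq]; exact h2
        rw [if_pos h2, ih (fun x hx => h x (List.mem_cons_of_mem _ hx)) _, hh]
        refine Prod.ext rfl ?_
        simp; ring
      · have hh : pvHit rl sl j.toNat = false := by
          simp only [pvHit, decide_eq_false_iff_not]; exact h2
        rw [if_neg h2, ih (fun x hx => h x (List.mem_cons_of_mem _ hx)) _, hh]
        simp

theorem pvMod_natCast (a p L : Nat) (hp : p < L) :
    PySem.Int.mod ((a * L + p : Nat) : Int) ((L : Nat) : Int) = (p : Int) := by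
  have hL' : (0:Int) < (L:Int) := by exact_mod_cast (show 0 < L by omega)
  rw [PySem.Int.mod_eq_emod_of_pos hL']
  push_cast
  have hre : (a:Int) * (L:Int) + (p:Int) = (p:Int) + (L:Int) * (a:Int) := by ring
  rw [hre, Int.add_mul_emod_self_left, Int.emod_eq_of_lt (by positivity) (by exact_mod_cast hp)]

theorem pvBFold_chunk (rl sl : List Char) (L k : Nat) (hL : 0 < L) (acc : List Int) :
    (PySem.List.pyRange ((k * L : Nat) : Int) ((k * L + L : Nat) : Int) 1).foldl
      (fun (st : List Int × Int) j =>
        if PySem.Int.mod j ((L : Nat) : Int) = ((L : Nat) : Int) - 1 then (st.1 ++ [st.2], 0)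
        else if rl.getD j.toNat ' ' ≠ '-' ∧ sl.getD j.toNat ' ' ≠ '-' ∧
                PySem.Chars.upperChar (rl.getD j.toNat ' ') ≠
                  PySem.Chars.upperChar (sl.getD j.toNat ' ')
        then (st.1, st.2 + 1) else st) (acc, 0)
      = (acc ++ [(((List.range (L - 1)).countP (fun p => pvHit rl sl (k * L + p)) : Nat) : Int)], 0) := by
  have h1 : ((k * L : Nat) : Int) ≤ ((k * L + (L - 1) : Nat) : Int) := by
    exact_mod_cast Nat.le_add_right _ _
  have h2 : ((k * L + (L - 1) : Nat) : Int) ≤ ((k * L + L : Nat) : Int) := by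
    have : k * L + (L - 1) ≤ k * L + L := by omega
    exact_mod_cast this
  rw [PySem.List.pyRange_one_append _ ((k * L + (L - 1) : Nat) : Int) _ h1 h2, List.foldl_append]
  rw [pvBFold_no_close rl sl _ _ ?hmem acc 0]
  case hmem =>
    intro j hj
    rw [PySem.List.mem_pyRange_one] at hj
    obtain ⟨hj1, hj2⟩ := hj
    obtain ⟨p, hp, rfl⟩ : ∃ p : Nat, p < L - 1 ∧ j = ((k * L + p : Nat) : Int) := by
      refine ⟨(j - (k * L : Nat)).toNat, by omega, by omega⟩
    rw [pvMod_natCast k p L (by omega)]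
    intro hcon
    have : (p : Int) = ((L - 1 : Nat) : Int) := by
      rw [hcon]; omega
    omega
  -- the closing element
  have hsing : ((k * L + L : Nat) : Int) = ((k * L + (L - 1) : Nat) : Int) + 1 := by
    push_cast; omega
  rw [hsing, PySem.List.pyRange_one ((k * L + (L - 1) : Nat) : Int) (((k * L + (L - 1) : Nat) : Int) + 1)]
  have h3 : (((k * L + (L - 1) : Nat) : Int) + 1 - ((k * L + (L - 1) : Nat) : Int)).toNat = 1 := by omega
  rw [h3]
  simp only [List.range_one, List.map_cons, List.map_nil, List.foldl_cons, List.foldl_nil,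
    Nat.cast_zero, add_zero]
  rw [if_pos (by rw [pvMod_natCast k (L - 1) L (by omega)]; omega)]
  -- identify the accumulated count with the range count
  congr 2
  rw [PySem.List.pyRange_one, List.countP_map]
  have hlen : (((k * L + (L - 1) : Nat) : Int) - ((k * L : Nat) : Int)).toNat = L - 1 := by
    push_cast; omega
  rw [hlen, zero_add]
  have hfun : ((fun j : Int => pvHit rl sl j.toNat) ∘ fun k_1 : Nat => ((k * L : Nat) : Int) + (k_1 : Int))
      = fun p : Nat => pvHit rl sl (k * L + p) := by
    funext p
    simp only [Function.comp_apply]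
    congr 1
  rw [hfun]

theorem pvGetD_drop_take (xs : List Char) (a n p : Nat) (hp : p < n) (d : Char) :
    ((xs.drop a).take n).getD p d = xs.getD (a + p) d := by
  rw [List.getD_eq_getElem?_getD, List.getD_eq_getElem?_getD, List.getElem?_take_of_lt hp,
    List.getElem?_drop]

theorem pvBFold_range (rl sl : List Char) (L : Nat) (hL : 0 < L) (k : Nat) :
    (PySem.List.pyRange 0 ((k * L : Nat) : Int) 1).foldl
      (fun (st : List Int × Int) j =>
        if PySem.Int.mod j ((L : Nat) : Int) = ((L : Nat) : Int) - 1 then (st.1 ++ [st.2], 0)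
        else if rl.getD j.toNat ' ' ≠ '-' ∧ sl.getD j.toNat ' ' ≠ '-' ∧
                PySem.Chars.upperChar (rl.getD j.toNat ' ') ≠
                  PySem.Chars.upperChar (sl.getD j.toNat ' ')
        then (st.1, st.2 + 1) else st) ([], 0)
      = ((List.range k).map
          (fun i => (((List.range (L - 1)).countP (fun p => pvHit rl sl (i * L + p)) : Nat) : Int)), 0) := by
  induction k with
  | zero => simp
  | succ k ih =>
      have hsplit := PySem.List.pyRange_one_append 0 ((k * L : Nat) : Int) (((k + 1) * L : Nat) : Int)
        (by positivity) (by exact_mod_cast Nat.mul_le_mul_right L (Nat.le_succ k))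
      rw [hsplit, List.foldl_append, ih]
      have hc : ((k + 1) * L : Nat) = (k * L + L : Nat) := by ring
      rw [hc, pvBFold_chunk rl sl L k hL]
      rw [List.range_succ, List.map_append, List.map_singleton]

theorem pvTdiv_nonpos (m : Nat) (l : Int) (h : l < 0) : Int.tdiv (m : Int) l ≤ 0 := by
  cases l with
  | ofNat n => exact absurd h (not_lt.mpr (Int.natCast_nonneg n))
  | negSucc k =>
      show Int.tdiv (Int.ofNat m) (Int.negSucc k) ≤ 0
      simp only [Int.tdiv]
      exact Int.neg_nonpos_of_nonneg (Int.natCast_nonneg _)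

theorem pv_main (r s : String) (l : Int)
    (hlen : r.toList.length = s.toList.length) (hl0 : l ≠ 0)
    (hlt : l < (r.toList.length : Int)) :
    segment_mut_count_pair_not r s l = segment_mut_count_pair_not_alt r s l := by
  by_cases hneg : l ≤ 0
  · -- l < 0: both return []
    have hneg' : l < 0 := lt_of_le_of_ne hneg hl0
    rw [segment_mut_count_pair_not, segment_mut_count_pair_not_alt, if_pos hneg]
    have h0 : (Int.tdiv (r.toList.length : Int) l - 0).toNat = 0 := by
      have := pvTdiv_nonpos r.toList.length l hneg'
      omega
    rw [PySem.List.pyRange_one, h0]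
    simp
  · -- l > 0
    have hLpos : 0 < l := lt_of_not_ge hneg
    obtain ⟨L, rfl⟩ : ∃ L : Nat, l = (L : Int) := ⟨l.toNat, (Int.toNat_of_nonneg hLpos.le).symm⟩
    have hL : 0 < L := by exact_mod_cast hLpos
    set m := r.toList.length with hm
    set N := m / L with hN
    -- A side
    rw [segment_mut_count_pair_not]
    have htdiv : Int.tdiv (m : Int) (L : Int) = ((N : Nat) : Int) := rfl
    rw [htdiv, PySem.List.foldl_append_singleton_eq_map, List.nil_append,
      PySem.List.pyRange_zero_natCast, List.map_map]
    -- B side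
    rw [segment_mut_count_pair_not_alt, if_neg hneg]
    have hfl : PySem.Int.floordiv (m : Int) (L : Int) * (L : Int) = ((N * L : Nat) : Int) := by
      rw [PySem.Int.floordiv_natCast]; norm_cast
    rw [hfl, pvBFold_range r.toList s.toList L hL N]
    -- pointwise equality of the two maps
    apply List.map_congr_left
    intro k hk
    have hkN : k < N := List.mem_range.mp hk
    have hbound : k * L + L ≤ m := by
      have h1 : (k + 1) * L ≤ N * L := Nat.mul_le_mul_right L hkN
      have h2 : N * L ≤ m := Nat.div_mul_le_self m L
      rw [Nat.succ_mul] at h1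
      omega
    simp only [Function.comp_apply]
    -- slice bounds
    have hb1 : ((L : Nat) : Int) * ((k : Nat) : Int) = ((k * L : Nat) : Int) := by push_cast; ring
    have hb2 : ((L : Nat) : Int) * (((k : Nat) : Int) + 1) - 1 = ((k * L + (L - 1) : Nat) : Int) := by
      push_cast [Nat.cast_sub (show 1 ≤ L by omega)]; ring
    rw [hb1, hb2, PySem.List.slice_natCast, PySem.List.slice_natCast]
    have hsub : (k * L + (L - 1)) - (k * L) = L - 1 := by omega
    rw [hsub]
    -- pvMutCount of the slices
    rw [pvMutCount, pvMutFold_fst]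
    have hlenfs : ((r.toList.drop (k * L)).take (L - 1)).length = L - 1 := by
      rw [List.length_take, List.length_drop, ← hm]
      omega
    rw [hlenfs, zero_add]
    congr 1
    apply List.countP_congr
    intro p hp
    have hpL : p < L - 1 := List.mem_range.mp hp
    simp only [pvHit]
    rw [pvGetD_drop_take _ _ _ _ hpL, pvGetD_drop_take _ _ _ _ hpL]

-- ===== VERDICT (by name: the statement is the Claim_ definition above) =====
theorem segment_mut_count_pair_not_spec : Claim_equal_segment_mut_count_pair_not := by
  intro r s l _ hPre
  unfold Spec_segment_mut_count_pair_not
  exact pv_main r s l hPre.1 hPre.2.1 hPre.2.2
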